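-- pv_equiv track=rewrite | github.com/kevin-ch-day/ScytaleDroid | scytaledroid/Reporting/menu_actions_cross_analysis_helpers.py | compact_regime
-- ===== SOURCE A (Python) =====
-- def compact_regime(value: object) -> str:
--     text = str(value or "—")
--     if text == "—":
--         return text
--     replacements = {
--         "Low Exposure": "LE",
--         "Medium Exposure": "ME",
--         "High Exposure": "HE",
--         "Low Deviation": "LD",
--         "Medium Deviation": "MD",
--         "High Deviation": "HD",
--     }
--     for source, target in replacements.items():
--         text = text.replace(source, target)
--     return text.replace(" + ", "+")
-- ===== SOURCE B (Python) =====
-- import re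
--
-- _MAP = {
--     "Low Exposure": "LE",
--     "Medium Exposure": "ME",
--     "High Exposure": "HE",
--     "Low Deviation": "LD",
--     "Medium Deviation": "MD",
--     "High Deviation": "HD",
--     " + ": "+",
-- }
-- _PAT = re.compile("|".join(re.escape(k) for k in _MAP))
--
--
-- def compact_regime(value: object) -> str:
--     text = str(value or "—")
--     if text == "—":
--         return text
--     return _PAT.sub(lambda m: _MAP[m.group(0)], text)
-- ===== Notes on version B (the rewrite author's own statement) =====
-- stated objective: alternative
-- what changed: replaces the six sequential full-string str.replace passes plus the final space-plus-space collapse pass by one compiled alternation regex (all seven escaped sources) applied in a single left-to-right scan with a substitution table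
import Mathlib
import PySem

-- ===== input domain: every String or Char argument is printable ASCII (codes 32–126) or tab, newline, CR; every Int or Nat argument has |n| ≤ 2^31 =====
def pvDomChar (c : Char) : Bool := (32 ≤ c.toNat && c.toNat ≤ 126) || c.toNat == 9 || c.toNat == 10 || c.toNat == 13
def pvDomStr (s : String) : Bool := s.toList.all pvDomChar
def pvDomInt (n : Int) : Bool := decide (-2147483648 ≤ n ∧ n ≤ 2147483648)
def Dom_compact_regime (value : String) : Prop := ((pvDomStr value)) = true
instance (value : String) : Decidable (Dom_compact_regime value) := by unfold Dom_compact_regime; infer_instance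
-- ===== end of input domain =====

-- B replaces A's six sequential full-string replace passes (plus the final space-plus-space pass) by a single
-- left-to-right scan against the seven-entry substitution table (Source B: one compiled alternation regex).

-- ===== PORT A =====
def compact_regime (value : String) : String :=
  -- str(value or "—"): for a str argument, `value or "—"` is "—" exactly when value is empty
  let text := if value = "" then "—" else value
  if text = "—" then text
  else
    let replacements : PySem.Dict String String :=
      PySem.Dict.ofList
        [("Low Exposure", "LE"), ("Medium Exposure", "ME"), ("High Exposure", "HE"),
         ("Low Deviation", "LD"), ("Medium Deviation", "MD"), ("High Deviation", "HD")]
    let text := replacements.items.foldl (fun t p => PySem.Str.replace t p.1 p.2) text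
    PySem.Str.replace text " + " "+"

-- ===== PORT B =====
-- the compiled alternation table of Source B, in pattern order (" + " last)
def tableB : List (List Char × List Char) :=
  [("Low Exposure".toList, "LE".toList), ("Medium Exposure".toList, "ME".toList),
   ("High Exposure".toList, "HE".toList), ("Low Deviation".toList, "LD".toList),
   ("Medium Deviation".toList, "MD".toList), ("High Deviation".toList, "HD".toList),
   (" + ".toList, "+".toList)]

-- single left-to-right scan: at each position, the first table source that matches is substituted
-- (every table source is nonempty; `max k.length 1` is `k.length`, written so only for termination)
def scanB : List Char → List Char
  | [] => []
  | c :: t =>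
    match tableB.find? (fun p => p.1.isPrefixOf (c :: t)) with
    | some (k, _v) => _v ++ scanB ((c :: t).drop (max k.length 1))
    | none => c :: scanB t
termination_by l => l.length
decreasing_by
  · simp only [List.length_drop, List.length_cons]; omega
  · simp only [List.length_cons]; omega

def compact_regime_alt (value : String) : String :=
  let text := if value = "" then "—" else value
  if text = "—" then text
  else String.ofList (scanB text.toList)

-- ===== PRECONDITION & SPEC =====
def Spec_compact_regime (value : String) (out : String) : Prop := out = compact_regime_alt value
instance (value : String) (out : String) : Decidable (Spec_compact_regime value out) := by unfold Spec_compact_regime; infer_instance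

-- ===== CLAIM (what is proved, stated in full; the proofs are below) =====
def Claim_equal_compact_regime : Prop := ∀ (value : String), Dom_compact_regime value → Spec_compact_regime value (compact_regime value)

-- ===== LEMMAS AND PROOFS =====

-- single-source scan: repW old nw is Python's s.replace(old, nw) for nonempty old
def repW (old nw : List Char) : List Char → List Char
  | [] => []
  | c :: t =>
    if old.isPrefixOf (c :: t) then nw ++ repW old nw ((c :: t).drop (max old.length 1))
    else c :: repW old nw t
termination_by l => l.length
decreasing_by
  · simp only [List.length_drop, List.length_cons]; omega
  · simp only [List.length_cons]; omega

lemma repW_nil (o n : List Char) : repW o n [] = [] := by rw [repW]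

lemma repW_cons (o n : List Char) (c : Char) (t : List Char) :
    repW o n (c :: t) =
      if o.isPrefixOf (c :: t) then n ++ repW o n ((c :: t).drop (max o.length 1))
      else c :: repW o n t := by rw [repW]

lemma go_eq_repW (old nw : List Char) (h : old ≠ []) :
    ∀ (fuel : Nat) (l acc : List Char), l.length ≤ fuel →
      PySem.Chars.replace.go old nw fuel l acc = acc.reverse ++ repW old nw l := by
  have hmax : max old.length 1 = old.length := by
    have : 0 < old.length := List.length_pos_of_ne_nil h
    omega
  intro fuel
  induction fuel with
  | zero =>
    intro l acc hl
    have : l = [] := List.eq_nil_of_length_eq_zero (Nat.le_zero.mp hl)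
    subst this
    simp [PySem.Chars.replace.go, repW_nil]
  | succ n ih =>
    intro l acc hl
    cases l with
    | nil => simp [PySem.Chars.replace.go, repW_nil]
    | cons c t =>
      rw [PySem.Chars.replace.go, repW_cons]
      by_cases hp : old.isPrefixOf (c :: t)
      · simp only [hp, if_true]
        rw [ih ((c :: t).drop old.length) (nw.reverse ++ acc)
            (by simp only [List.length_drop, List.length_cons] at *; omega)]
        simp [hmax]
      · simp only [hp, Bool.false_eq_true, if_false]
        rw [ih t (c :: acc) (by simp at hl; omega)]
        simp

lemma replace_eq_repW (s old nw : List Char) (h : old ≠ []) :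
    PySem.Chars.replace s old nw = repW old nw s := by
  unfold PySem.Chars.replace
  rw [if_neg (by simp [h])]
  simpa using go_eq_repW old nw h s.length s [] le_rfl

-- the per-stage fold step of A (text = text.replace(source, target) over the table)
def stepR (x : List Char) (p : List Char × List Char) : List Char := repW p.1 p.2 x

set_option maxRecDepth 10000
-- concrete facts about the seven-entry table, checked by computation
lemma fact_ne : ∀ p ∈ tableB, p.1 ≠ [] ∧ p.2 ≠ [] := by decide
lemma fact_nodup : tableB.Nodup := by decide

-- no source's tail contains the first character of another entry's target
lemma fact_hd : ∀ p ∈ tableB, ∀ s ∈ tableB, p ≠ s → ∀ ch ∈ p.1.drop 1, s.2.head? ≠ some ch := by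
  have h : tableB.all (fun p => tableB.all (fun s =>
      (p == s) || (p.1.drop 1).all (fun ch => !(s.2.head? == some ch)))) = true := by decide
  simp only [List.all_eq_true, Bool.or_eq_true, beq_iff_eq, Bool.not_eq_true',
    beq_eq_false_iff_ne] at h
  intro p hp s hs hne ch hch
  rcases h p hp s hs with h1 | h1
  · exact absurd h1 hne
  · exact h1 ch hch

-- every nonempty suffix of another entry's source clashes with a source (neither prefixes the other)
lemma fact_src : ∀ p ∈ tableB, ∀ q ∈ tableB, p ≠ q →
    ∀ m, m < q.1.length → ¬ p.1 <+: q.1.drop m ∧ ¬ q.1.drop m <+: p.1 := by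
  have h : tableB.all (fun p => tableB.all (fun q =>
      (p == q) || (List.range q.1.length).all (fun m =>
        !(p.1.isPrefixOf (q.1.drop m)) && !((q.1.drop m).isPrefixOf p.1)))) = true := by decide
  simp only [List.all_eq_true, Bool.or_eq_true, beq_iff_eq, Bool.and_eq_true,
    Bool.not_eq_true', List.mem_range] at h
  intro p hp q hq hne m hm
  rcases h p hp q hq with h1 | h1
  · exact absurd h1 hne
  · have h2 := h1 m hm
    constructor
    · intro hc
      have := List.isPrefixOf_iff_prefix.mpr hc
      rw [h2.1] at this; cases this
    · intro hc
      have := List.isPrefixOf_iff_prefix.mpr hc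
      rw [h2.2] at this; cases this

-- every nonempty suffix of another entry's target clashes with a source
lemma fact_tgt : ∀ p ∈ tableB, ∀ q ∈ tableB, p ≠ q →
    ∀ m, m < q.2.length → ¬ p.1 <+: q.2.drop m ∧ ¬ q.2.drop m <+: p.1 := by
  have h : tableB.all (fun p => tableB.all (fun q =>
      (p == q) || (List.range q.2.length).all (fun m =>
        !(p.1.isPrefixOf (q.2.drop m)) && !((q.2.drop m).isPrefixOf p.1)))) = true := by decide
  simp only [List.all_eq_true, Bool.or_eq_true, beq_iff_eq, Bool.and_eq_true,
    Bool.not_eq_true', List.mem_range] at h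
  intro p hp q hq hne m hm
  rcases h p hp q hq with h1 | h1
  · exact absurd h1 hne
  · have h2 := h1 m hm
    constructor
    · intro hc
      have := List.isPrefixOf_iff_prefix.mpr hc
      rw [h2.1] at this; cases this
    · intro hc
      have := List.isPrefixOf_iff_prefix.mpr hc
      rw [h2.2] at this; cases this

lemma prefix_append_cases {l a b : List Char} (h : l <+: a ++ b) : l <+: a ∨ a <+: l := by
  induction a generalizing l with
  | nil => exact Or.inr (List.nil_prefix)
  | cons y a' ih =>
    cases l with
    | nil => exact Or.inl (List.nil_prefix)
    | cons x l' =>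
      rw [List.cons_append, List.cons_prefix_cons] at h
      rcases h with ⟨rfl, h'⟩
      rcases ih h' with h1 | h1
      · exact Or.inl (List.cons_prefix_cons.mpr ⟨rfl, h1⟩)
      · exact Or.inr (List.cons_prefix_cons.mpr ⟨rfl, h1⟩)

-- a single replace pass slides over a block in which its source can match nowhere
lemma pushOne (key nw : List Char)
    (a : List Char) (h : ∀ m, m < a.length → ¬ key <+: a.drop m ∧ ¬ a.drop m <+: key) :
    ∀ x, repW key nw (a ++ x) = a ++ repW key nw x := by
  induction a with
  | nil => intro x; rfl
  | cons c a' ih =>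
    intro x
    rw [List.cons_append, repW_cons]
    have hnp : ¬ key.isPrefixOf (c :: (a' ++ x)) := by
      rw [List.isPrefixOf_iff_prefix]
      intro hcon
      rcases prefix_append_cases (a := c :: a') hcon with h1 | h1
      · exact (h 0 (by simp)).1 h1
      · exact (h 0 (by simp)).2 h1
    rw [if_neg hnp, ih (fun m hm => h (m + 1) (by simp; omega))]
    simp

-- a replace pass whose target starts with a character absent from q cannot create a prefix p ⊆ q
lemma stage' (key nw : List Char) (v0 : Char) (vr : List Char) (hv : nw = v0 :: vr)
    (q : List Char) (hq : ∀ ch ∈ q, ch ≠ v0) :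
    ∀ (n : Nat) (x : List Char), x.length ≤ n → ∀ p, p <:+ q → ¬ p <+: x → ¬ p <+: repW key nw x := by
  intro n
  induction n with
  | zero =>
    intro x hx p _ hp
    have : x = [] := List.eq_nil_of_length_eq_zero (Nat.le_zero.mp hx)
    subst this
    simpa [repW_nil] using hp
  | succ n ih =>
    intro x hx p hs hp
    cases x with
    | nil => simpa [repW_nil] using hp
    | cons c t =>
      rw [repW_cons]
      by_cases hpre : key.isPrefixOf (c :: t)
      · rw [if_pos hpre]
        intro hcon
        cases p with
        | nil => exact hp List.nil_prefix
        | cons p0 p' =>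
          rw [hv, List.cons_append, List.cons_prefix_cons] at hcon
          exact hq p0 (hs.subset (List.mem_cons_self)) hcon.1
      · rw [if_neg hpre]
        intro hcon
        cases p with
        | nil => exact hp List.nil_prefix
        | cons p0 p' =>
          rw [List.cons_prefix_cons] at hcon
          rcases hcon with ⟨rfl, hcon⟩
          have hpt : ¬ p' <+: t := by
            intro hx; exact hp (List.cons_prefix_cons.mpr ⟨rfl, hx⟩)
          have hs' : p' <:+ q := (List.suffix_cons p0 p').trans hs
          exact ih t (by simp at hx; omega) p' hs' hpt hcon

-- a replace pass for stage s cannot create a head match of a different source `key`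
lemma pres (key skey snw : List Char) (v0 : Char) (vr : List Char) (hv : snw = v0 :: vr)
    (hq : ∀ ch ∈ key.drop 1, ch ≠ v0) :
    ∀ c x, ¬ key <+: c :: x → ¬ key <+: c :: repW skey snw x := by
  intro c x h hcon
  cases key with
  | nil => exact h List.nil_prefix
  | cons a q =>
    rw [List.cons_prefix_cons] at hcon
    rcases hcon with ⟨rfl, hcon⟩
    have hqx : ¬ q <+: x := by
      intro hx; exact h (List.cons_prefix_cons.mpr ⟨rfl, hx⟩)
    exact stage' skey snw v0 vr hv q (by simpa using hq) x.length x le_rfl q List.suffix_rfl hqx hcon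

-- when no source matches at the head, the whole pipeline copies the head character
lemma cons_push : ∀ (S : List (List Char × List Char)), S.Nodup → (∀ p ∈ S, p ∈ tableB) →
    ∀ c x, (∀ p ∈ S, ¬ p.1 <+: c :: x) → S.foldl stepR (c :: x) = c :: S.foldl stepR x := by
  intro S
  induction S with
  | nil => intro _ _ c x _; rfl
  | cons s S' ih =>
    intro hnd hsub c x h
    have hstep : stepR (c :: x) s = c :: repW s.1 s.2 x := by
      unfold stepR
      rw [repW_cons, if_neg (by rw [List.isPrefixOf_iff_prefix]; exact h s List.mem_cons_self)]
    have hs2 : s.2 ≠ [] := (fact_ne s (hsub s List.mem_cons_self)).2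
    obtain ⟨v0, vr, hv⟩ : ∃ v0 vr, s.2 = v0 :: vr := by
      cases hx : s.2 with
      | nil => exact absurd hx hs2
      | cons a b => exact ⟨a, b, rfl⟩
    have h' : ∀ p ∈ S', ¬ p.1 <+: c :: repW s.1 s.2 x := by
      intro p hp
      have hps : p ≠ s := by
        rintro rfl; exact (List.nodup_cons.mp hnd).1 hp
      have hhd := fact_hd p (hsub p (List.mem_cons_of_mem s hp)) s (hsub s List.mem_cons_self) hps
      refine pres p.1 s.1 s.2 v0 vr hv ?_ c x (h p (List.mem_cons_of_mem s hp))
      intro ch hch hc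
      exact hhd ch hch (by rw [hv, hc]; rfl)
    calc (s :: S').foldl stepR (c :: x) = S'.foldl stepR (stepR (c :: x) s) := rfl
      _ = S'.foldl stepR (c :: repW s.1 s.2 x) := by rw [hstep]
      _ = c :: S'.foldl stepR (repW s.1 s.2 x) :=
          ih (List.nodup_cons.mp hnd).2 (fun p hp => hsub p (List.mem_cons_of_mem s hp)) c _ h'
      _ = c :: (s :: S').foldl stepR x := rfl

-- the whole pipeline slides over a block in which none of its sources can match
lemma append_push (a : List Char) :
    ∀ (S : List (List Char × List Char)),
      (∀ p ∈ S, ∀ m, m < a.length → ¬ p.1 <+: a.drop m ∧ ¬ a.drop m <+: p.1) →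
      ∀ x, S.foldl stepR (a ++ x) = a ++ S.foldl stepR x := by
  intro S
  induction S with
  | nil => intro _ x; rfl
  | cons s S' ih =>
    intro h x
    calc (s :: S').foldl stepR (a ++ x) = S'.foldl stepR (repW s.1 s.2 (a ++ x)) := rfl
      _ = S'.foldl stepR (a ++ repW s.1 s.2 x) := by
          rw [pushOne s.1 s.2 a (h s List.mem_cons_self) x]
      _ = a ++ S'.foldl stepR (repW s.1 s.2 x) :=
          ih (fun p hp => h p (List.mem_cons_of_mem s hp)) _
      _ = a ++ (s :: S').foldl stepR x := rfl

-- when source k (an entry of the table) matches at the head, the pipeline emits its target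
lemma match_push (k v : List Char) (hkv : (k, v) ∈ tableB) :
    ∀ (S : List (List Char × List Char)), S.Nodup → (∀ p ∈ S, p ∈ tableB) → (k, v) ∈ S →
      ∀ r, S.foldl stepR (k ++ r) = v ++ S.foldl stepR r := by
  have hk : k ≠ [] := (fact_ne (k, v) hkv).1
  have hmax : max k.length 1 = k.length := by
    have : 0 < k.length := List.length_pos_of_ne_nil hk
    omega
  intro S
  induction S with
  | nil => intro _ _ hmem; exact absurd hmem (List.not_mem_nil)
  | cons s S' ih =>
    intro hnd hsub hmem r
    by_cases hs : s = (k, v)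
    · subst hs
      have hstep : stepR (k ++ r) (k, v) = v ++ repW k v r := by
        unfold stepR
        cases k with
        | nil => exact absurd rfl hk
        | cons k0 k' =>
          rw [List.cons_append, repW_cons,
            if_pos (by rw [List.isPrefixOf_iff_prefix]; exact ⟨r, rfl⟩)]
          simp only [← List.cons_append, hmax]
          rw [List.drop_left]
      have hnotin : (k, v) ∉ S' := (List.nodup_cons.mp hnd).1
      calc ((k, v) :: S').foldl stepR (k ++ r) = S'.foldl stepR (stepR (k ++ r) (k, v)) := rfl
        _ = S'.foldl stepR (v ++ repW k v r) := by rw [hstep]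
        _ = v ++ S'.foldl stepR (repW k v r) := by
            refine append_push v S' ?_ _
            intro p hp m hm
            have hps : p ≠ (k, v) := by rintro rfl; exact hnotin hp
            exact fact_tgt p (hsub p (List.mem_cons_of_mem _ hp)) (k, v) hkv hps m hm
        _ = v ++ ((k, v) :: S').foldl stepR r := rfl
    · have hmem' : (k, v) ∈ S' := by
        rcases List.mem_cons.mp hmem with h1 | h1
        · exact absurd h1.symm hs
        · exact h1
      have hstep : stepR (k ++ r) s = k ++ repW s.1 s.2 r := by
        unfold stepR
        refine pushOne s.1 s.2 k ?_ r
        intro m hm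
        have hsp : s ≠ (k, v) := hs
        exact fact_src s (hsub s List.mem_cons_self) (k, v) hkv hsp m hm
      calc (s :: S').foldl stepR (k ++ r) = S'.foldl stepR (stepR (k ++ r) s) := rfl
        _ = S'.foldl stepR (k ++ repW s.1 s.2 r) := by rw [hstep]
        _ = v ++ S'.foldl stepR (repW s.1 s.2 r) :=
            ih (List.nodup_cons.mp hnd).2 (fun p hp => hsub p (List.mem_cons_of_mem s hp)) hmem' _
        _ = v ++ (s :: S').foldl stepR r := rfl

lemma foldl_nil_state : ∀ (S : List (List Char × List Char)), S.foldl stepR [] = [] := by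
  intro S
  induction S with
  | nil => rfl
  | cons s S' ih => simpa [stepR, repW_nil] using ih

lemma scanB_nil : scanB [] = [] := by rw [scanB]

lemma scanB_cons (c : Char) (t : List Char) :
    scanB (c :: t) =
      match tableB.find? (fun p => p.1.isPrefixOf (c :: t)) with
      | some (k, _v) => _v ++ scanB ((c :: t).drop (max k.length 1))
      | none => c :: scanB t := by rw [scanB]

-- MAIN: the sequential seven-pass pipeline equals the single scan
lemma main_eq : ∀ (n : Nat) (l : List Char), l.length ≤ n → tableB.foldl stepR l = scanB l := by
  intro n
  induction n with
  | zero =>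
    intro l hl
    have : l = [] := List.eq_nil_of_length_eq_zero (Nat.le_zero.mp hl)
    subst this
    rw [foldl_nil_state, scanB_nil]
  | succ n ih =>
    intro l hl
    cases l with
    | nil => rw [foldl_nil_state, scanB_nil]
    | cons c t =>
      cases hf : tableB.find? (fun p => p.1.isPrefixOf (c :: t)) with
      | none =>
        rw [scanB_cons, hf]
        have hnone := List.find?_eq_none.mp hf
        have h' : ∀ p ∈ tableB, ¬ p.1 <+: c :: t := by
          intro p hp
          have := hnone p hp
          rw [← List.isPrefixOf_iff_prefix (l₁ := p.1) (l₂ := c :: t)]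
          simpa using this
        rw [cons_push tableB fact_nodup (fun p hp => hp) c t h',
          ih t (by simp at hl; omega)]
      | some pv =>
        obtain ⟨k, v⟩ := pv
        rw [scanB_cons, hf]
        have hmem : (k, v) ∈ tableB := List.mem_of_find?_eq_some hf
        have hpref : k <+: c :: t := by
          have := List.find?_some hf
          simpa [List.isPrefixOf_iff_prefix] using this
        obtain ⟨r, hr⟩ := hpref
        have hk : k ≠ [] := (fact_ne (k, v) hmem).1
        have hmax : max k.length 1 = k.length := by
          have : 0 < k.length := List.length_pos_of_ne_nil hk
          omega
        have hdrop : (c :: t).drop (max k.length 1) = r := by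
          rw [hmax, ← hr, List.drop_left]
        have hlen : r.length ≤ n := by
          have h1 : k.length + r.length = t.length + 1 := by
            have := congrArg List.length hr
            simpa using this
          have h2 : 0 < k.length := List.length_pos_of_ne_nil hk
          simp only [List.length_cons] at hl
          omega
        show List.foldl stepR (c :: t) tableB = v ++ scanB ((c :: t).drop (max k.length 1))
        rw [hdrop, ← hr,
          match_push k v hmem tableB fact_nodup (fun p hp => hp) hmem r,
          ih r hlen]

-- A's dict literal iterates in insertion order
lemma items_eval :
    (PySem.Dict.ofList
      [("Low Exposure", "LE"), ("Medium Exposure", "ME"), ("High Exposure", "HE"),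
       ("Low Deviation", "LD"), ("Medium Deviation", "MD"),
       ("High Deviation", "HD")] : PySem.Dict String String).items =
      [("Low Exposure", "LE"), ("Medium Exposure", "ME"), ("High Exposure", "HE"),
       ("Low Deviation", "LD"), ("Medium Deviation", "MD"), ("High Deviation", "HD")] := by
  decide

lemma a_toList (s : String) :
    (PySem.Str.replace
      ([("Low Exposure", "LE"), ("Medium Exposure", "ME"), ("High Exposure", "HE"),
        ("Low Deviation", "LD"), ("Medium Deviation", "MD"),
        ("High Deviation", "HD")].foldl (fun t p => PySem.Str.replace t p.1 p.2) s)
      " + " "+").toList = tableB.foldl stepR s.toList := by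
  simp only [List.foldl, tableB, stepR, PySem.Str.toList_replace]
  rw [replace_eq_repW _ _ _ (by decide), replace_eq_repW _ _ _ (by decide),
    replace_eq_repW _ _ _ (by decide), replace_eq_repW _ _ _ (by decide),
    replace_eq_repW _ _ _ (by decide), replace_eq_repW _ _ _ (by decide),
    replace_eq_repW _ _ _ (by decide)]

-- ===== VERDICT (by name: the statement is the Claim_ definition above) =====
theorem compact_regime_spec : Claim_equal_compact_regime := by
  intro value _
  unfold Spec_compact_regime compact_regime compact_regime_alt
  by_cases h0 : value = ""
  · simp [h0]
  · by_cases h1 : value = "—"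
    · simp [h1]
    · simp only [h0, h1, if_false]
      apply String.toList_inj.mp
      rw [items_eval, a_toList, main_eq value.toList.length value.toList le_rfl]
      exact String.toList_ofList.symm
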